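-- pv_equiv track=rewrite | github.com/gauthierbizzarri/pathfinding | Prj_Int_Epreuve3.py | conv_dir
-- ===== SOURCE A (Python) =====
-- def conv_dir(chaine): #permet de convertir la chaine sous le format: se déplace toujours ver l'avant et tourne sur lui-même
--     chaine2 = "" #définit une chaine vide
--     for i in range(len(chaine)):    #pour i parcourant la chaine
--         if i > 0:                       #si i est supérieur à 0 alors:
--             if chaine[i] != chaine[i-1]:    #si le caractére actuel est différent du caractère précédent alors:
--                 chaine2 = chaine2 + chaine[i] + 'A'     #j'ajoute le caractere actuel + le carcatère A dans la chaine2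
--             else:                           #sinon
--                 chaine2 = chaine2 + 'A'         #j'ajoute le caractere A dans chaine2
--         else:                           #sinon
--             chaine2 = 'A'                   #la chaine vaut A
--     return chaine2                  #retourne la chaine2
-- ===== SOURCE B (Python) =====
-- from itertools import groupby
--
--
-- def conv_dir(chaine):
--     # Walk consecutive runs of equal characters instead of comparing each
--     # character with its predecessor: the first run of length L contributes
--     # 'A'*L, every later run of length L contributes its char + 'A'*L.
--     pieces = []
--     first = True
--     for ch, grp in groupby(chaine):
--         n = len(list(grp))
--         if first:
--             pieces.append('A' * n)
--             first = False
--         else: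
--             pieces.append(ch + 'A' * n)
--     return ''.join(pieces)
-- ===== Notes on version B (the rewrite author's own statement) =====
-- stated objective: faster
-- what changed: B walks consecutive runs of equal characters with itertools.groupby (first run -> 'A'*L, each later run -> char + 'A'*L) and joins the pieces at the end, instead of A's index loop comparing chaine[i] with chaine[i-1] and rebuilding the string by repeated concatenation.
import Mathlib
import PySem

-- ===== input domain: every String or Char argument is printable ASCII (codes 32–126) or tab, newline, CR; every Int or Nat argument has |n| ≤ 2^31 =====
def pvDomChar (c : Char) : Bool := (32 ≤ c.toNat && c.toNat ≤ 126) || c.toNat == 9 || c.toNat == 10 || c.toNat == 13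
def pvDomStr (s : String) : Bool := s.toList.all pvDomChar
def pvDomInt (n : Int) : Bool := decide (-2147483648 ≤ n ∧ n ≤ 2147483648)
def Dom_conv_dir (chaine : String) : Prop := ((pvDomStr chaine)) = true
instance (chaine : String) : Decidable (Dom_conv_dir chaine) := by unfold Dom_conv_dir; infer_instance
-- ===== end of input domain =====

-- B replaces A's index loop (compare chaine[i] with chaine[i-1]) by a walk over
-- consecutive runs of equal characters, joining the pieces once at the end (measured faster: A rebuilds the string by repeated concatenation).

-- ===== PORT A =====
-- A: chaine2 = ""; for i in range(len(chaine)): if i>0: compare chaine[i], chaine[i-1]; else chaine2='A'.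
-- Indices i and i-1 are always in range when read, so pyGetD's default ' ' is never used.
def conv_dir (chaine : String) : String :=
  let cs := chaine.toList
  let chaine2 :=
    (PySem.List.pyRange 0 (cs.length : Int)).foldl
      (fun (ch2 : List Char) (i : Int) =>
        if i > 0 then
          if PySem.List.pyGetD cs i ' ' ≠ PySem.List.pyGetD cs (i - 1) ' ' then
            ch2 ++ [PySem.List.pyGetD cs i ' '] ++ ['A']
          else
            ch2 ++ ['A']
        else
          ['A'])
      []
  String.ofList chaine2

-- ===== PORT B =====
-- groupby(chaine): the list of (char, run length) over consecutive runs (hand port, exact: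
-- built by structural recursion, merging equal adjacent heads).
def pvRuns : List Char → List (Char × Nat)
  | [] => []
  | c :: cs =>
    match pvRuns cs with
    | (d, n) :: rs => if c == d then (c, n + 1) :: rs else (c, 1) :: (d, n) :: rs
    | [] => [(c, 1)]

-- B: pieces = []; first = True; for ch, grp in groupby: append 'A'*n or ch + 'A'*n; ''.join(pieces).
def conv_dir_alt (chaine : String) : String :=
  let res :=
    (pvRuns chaine.toList).foldl
      (fun (st : List (List Char) × Bool) (r : Char × Nat) =>
        if st.2 then (st.1 ++ [List.replicate r.2 'A'], false)
        else (st.1 ++ [r.1 :: List.replicate r.2 'A'], st.2))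
      ([], true)
  String.ofList res.1.flatten

-- ===== PRECONDITION & SPEC =====
def Spec_conv_dir (chaine : String) (out : String) : Prop := out = conv_dir_alt chaine
instance (chaine : String) (out : String) : Decidable (Spec_conv_dir chaine out) := by unfold Spec_conv_dir; infer_instance

-- ===== CLAIM (what is proved, stated in full; the proofs are below) =====
def Claim_equal_conv_dir : Prop := ∀ (chaine : String), Dom_conv_dir chaine → Spec_conv_dir chaine (conv_dir chaine)

-- ===== LEMMAS AND PROOFS =====

-- Pairwise rendering (A's view, index-free): previous char p, then each char versus its predecessor.
def pvPair (p : Char) : List Char → List Char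
  | [] => []
  | c :: t => (if c ≠ p then [c, 'A'] else ['A']) ++ pvPair c t

-- Run rendering of the NON-first runs (B's view).
def pvRest : List (Char × Nat) → List Char
  | [] => []
  | (c, n) :: rs => c :: (List.replicate n 'A' ++ pvRest rs)

theorem pvRuns_cons_head (x : Char) (xs : List Char) :
    ∃ n rs, pvRuns (x :: xs) = (x, n) :: rs := by
  cases h : pvRuns xs with
  | nil => exact ⟨1, [], by simp [pvRuns, h]⟩
  | cons p rs =>
    obtain ⟨d, n⟩ := p
    by_cases hc : x = d
    · exact ⟨n + 1, rs, by simp [pvRuns, h, hc]⟩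
    · exact ⟨1, (d, n) :: rs, by simp [pvRuns, h, hc]⟩

-- A's loop body for indices ≥ 1, over the suffix, as structural recursion.
theorem loopA (cs : List Char) : ∀ (m k : Nat) (acc : List Char), k + 1 + m = cs.length →
    (List.range' (k + 1) m).foldl
      (fun (ch2 : List Char) (i : Nat) =>
        if (cs.getD i ' ') ≠ (cs.getD (i - 1) ' ') then
          ch2 ++ [cs.getD i ' '] ++ ['A']
        else ch2 ++ ['A'])
      acc
    = acc ++ pvPair (cs.getD k ' ') (cs.drop (k + 1)) := by
  intro m
  induction m with
  | zero =>
    intro k acc h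
    have : cs.drop (k + 1) = [] := by
      apply List.drop_eq_nil_of_le; omega
    simp [this, pvPair]
  | succ m ih =>
    intro k acc h
    have hk1 : k + 1 < cs.length := by omega
    have hk : k < cs.length := by omega
    have hdrop : cs.drop (k + 1) = cs[k + 1] :: cs.drop (k + 2) :=
      List.drop_eq_getElem_cons hk1
    rw [List.range'_succ, List.foldl_cons]
    have e1 : cs.getD (k + 1) ' ' = cs[k + 1] := by
      simp [List.getD_eq_getElem?_getD, List.getElem?_eq_getElem hk1]
    have e0 : cs.getD (k + 1 - 1) ' ' = cs[k]'hk := by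
      simp [List.getD_eq_getElem?_getD, List.getElem?_eq_getElem hk]
    have e0' : cs.getD k ' ' = cs[k]'hk := by
      simp [List.getD_eq_getElem?_getD, List.getElem?_eq_getElem hk]
    rw [ih (k + 1) _ (by omega)]
    rw [hdrop, pvPair, e1, e0, e0']
    by_cases hne : cs[k + 1] ≠ cs[k]'hk
    · simp [hne]
    · simp [hne]

-- A on a nonempty string equals 'A' followed by the pairwise rendering.
theorem convA_cons (c : Char) (t : List Char) :
    conv_dir (String.ofList (c :: t)) = String.ofList ('A' :: pvPair c t) := by
  unfold conv_dir
  simp only [String.toList_ofList, List.length_cons]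
  rw [PySem.List.pyRange_zero_natCast, List.foldl_map]
  rw [List.range_eq_range', List.range'_succ, List.foldl_cons]
  have hbody : ∀ (acc : List Char), ∀ k ∈ List.range' 1 t.length 1,
      (fun (ch2 : List Char) (i : Int) =>
        if i > 0 then
          if PySem.List.pyGetD (c :: t) i ' ' ≠ PySem.List.pyGetD (c :: t) (i - 1) ' ' then
            ch2 ++ [PySem.List.pyGetD (c :: t) i ' '] ++ ['A']
          else ch2 ++ ['A']
        else ['A']) acc (k : Int)
      = (fun (ch2 : List Char) (i : Nat) =>
          if ((c :: t).getD i ' ') ≠ ((c :: t).getD (i - 1) ' ') then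
            ch2 ++ [(c :: t).getD i ' '] ++ ['A']
          else ch2 ++ ['A']) acc k := by
    intro acc k hk
    have h1 : 1 ≤ k := (List.mem_range'_1.mp hk).1
    have hpos : (0 : Int) < (k : Int) := by exact_mod_cast h1
    have hcast : ((k : Int) - 1) = ((k - 1 : Nat) : Int) := by omega
    simp only [if_pos hpos, hcast, PySem.List.pyGetD_natCast]
  rw [PySem.List.foldl_congr_mem _ _ _ _ hbody]
  have h0 : ¬ ((0 : Int) > 0) := by norm_num
  simp only [Int.natCast_zero, if_neg h0]
  rw [loopA (c :: t) t.length 0 ['A'] (by simp only [List.length_cons]; omega)]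
  simp

-- B's loop once 'first' is consumed.
theorem loopB (rs : List (Char × Nat)) : ∀ (acc : List (List Char)),
    ((rs.foldl
      (fun (st : List (List Char) × Bool) (r : Char × Nat) =>
        if st.2 then (st.1 ++ [List.replicate r.2 'A'], false)
        else (st.1 ++ [r.1 :: List.replicate r.2 'A'], st.2))
      (acc, false)).1).flatten
    = acc.flatten ++ pvRest rs := by
  induction rs with
  | nil => intro acc; simp [pvRest]
  | cons r rs ih =>
    intro acc
    obtain ⟨c, n⟩ := r
    simp only [List.foldl_cons, if_neg (by simp : ¬ (false = true))]
    rw [ih]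
    simp [pvRest]

-- Runs rendering equals pairwise rendering.
theorem runs_pair (t : List Char) : ∀ (c : Char),
    (match pvRuns (c :: t) with
     | (_, n) :: rs => List.replicate n 'A' ++ pvRest rs
     | [] => []) = 'A' :: pvPair c t := by
  induction t with
  | nil => intro c; simp [pvRuns, pvPair, pvRest]
  | cons d t' ih =>
    intro c
    obtain ⟨n, rs, hruns⟩ := pvRuns_cons_head d t'
    have ihd := ih d
    rw [hruns] at ihd
    simp only at ihd
    have hstep : pvRuns (c :: d :: t') =
        (match pvRuns (d :: t') with
         | (e, m) :: rs' => if c == e then (c, m + 1) :: rs' else (c, 1) :: (e, m) :: rs'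
         | [] => [(c, 1)]) := rfl
    by_cases hc : c = d
    · have hr : pvRuns (c :: d :: t') = (c, n + 1) :: rs := by
        rw [hstep, hruns]; simp [hc]
      rw [hr]
      simp only [List.replicate_succ, List.cons_append]
      rw [ihd]
      simp [pvPair, hc]
    · have hr : pvRuns (c :: d :: t') = (c, 1) :: (d, n) :: rs := by
        rw [hstep, hruns]; simp [hc]
      rw [hr]
      simp only [List.replicate_one, pvRest, List.cons_append, List.nil_append]
      rw [ihd]
      have hne : d ≠ c := fun h => hc h.symm
      simp [pvPair, hne]

-- The two ports agree on every character list.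
theorem conv_eq_list (cs : List Char) :
    conv_dir (String.ofList cs) = conv_dir_alt (String.ofList cs) := by
  cases cs with
  | nil => rfl
  | cons c t =>
    rw [convA_cons]
    unfold conv_dir_alt
    simp only [String.toList_ofList]
    obtain ⟨n, rs, hr⟩ := pvRuns_cons_head c t
    have hpair := runs_pair t c
    rw [hr] at hpair
    simp only at hpair
    rw [hr, List.foldl_cons]
    simp only [if_true, List.nil_append]
    rw [loopB rs [List.replicate n 'A']]
    simp only [List.flatten_cons, List.flatten_nil, List.append_nil] at *
    rw [hpair]

-- ===== VERDICT (by name: the statement is the Claim_ definition above) =====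
theorem conv_dir_spec : Claim_equal_conv_dir := by
  intro chaine _
  show conv_dir chaine = conv_dir_alt chaine
  have h := conv_eq_list chaine.toList
  rwa [String.ofList_toList] at h
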